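-- pv_equiv track=rewrite | github.com/ishita-k-007/Python | arrays_basics.py | deletionExceptNOccurencesAlgo
-- ===== SOURCE A (Python) =====
-- def deletionSpecificIndexAlgo(val, idx_specified, arr_x):
--
--     # element has to be present at that index.. return the iterable as it is
--     len_arr = len(arr_x)
--     idx = 0
--     count = 0
--     while idx < len_arr:
--         if idx == idx_specified and arr_x[idx] == val:
--             while idx < len_arr - 1:
--                 arr_x[idx] = arr_x[idx+1]
--                 idx += 1
--             count += 1
--         idx += 1
--     if count > 0:
--         return arr_x[:idx-1]
--
--     return arr_x
--
-- def deletionExceptNOccurencesAlgo(val, count, arr_res_p):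
--
--     idx = 0
--     while idx < len(arr_res_p):
--         if arr_res_p[idx] == val:
--             if count <= 0:
--                 arr_res_p = deletionSpecificIndexAlgo(val, idx, arr_res_p)
--                 idx -= 1
--             count -= 1
--         idx += 1
--     return arr_res_p[:len(arr_res_p)]
-- ===== SOURCE B (Python) =====
-- # Single pass with an occurrence counter, building a fresh output list
-- # (A deletes in place by repeated shifting; equivalence is about the return
-- # value only -- A mutates its argument on the first deletion, B never does).
-- def deletionExceptNOccurencesAlgo(val, count, arr_res_p):
--     out = []
--     seen = 0
--     for x in arr_res_p:
--         if x == val: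
--             seen += 1
--             if seen <= count:
--                 out.append(x)
--         else:
--             out.append(x)
--     return out
-- ===== Notes on version B (the rewrite author's own statement) =====
-- stated objective: faster
-- what changed: Replaces A's while-loop that deletes each excess occurrence by an O(n) in-place shift (via deletionSpecificIndexAlgo) with a single pass that counts occurrences of val and appends kept elements to a fresh list.
import Mathlib
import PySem

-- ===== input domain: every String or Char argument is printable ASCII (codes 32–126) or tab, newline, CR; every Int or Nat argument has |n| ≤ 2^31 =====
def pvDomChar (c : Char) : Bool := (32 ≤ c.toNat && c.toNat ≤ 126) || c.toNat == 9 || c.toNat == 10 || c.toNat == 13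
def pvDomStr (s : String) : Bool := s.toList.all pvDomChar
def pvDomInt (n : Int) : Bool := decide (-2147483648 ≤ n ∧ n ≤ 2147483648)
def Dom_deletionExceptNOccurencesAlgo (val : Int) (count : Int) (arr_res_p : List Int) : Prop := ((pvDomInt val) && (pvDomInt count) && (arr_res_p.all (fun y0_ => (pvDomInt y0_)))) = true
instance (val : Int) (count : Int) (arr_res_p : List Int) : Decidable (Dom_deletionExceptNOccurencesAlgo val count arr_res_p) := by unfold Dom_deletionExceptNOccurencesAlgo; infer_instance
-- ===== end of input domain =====

-- B replaces A's repeated in-place shift-deletion with a single counting pass building a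
-- fresh list (equivalence is about the RETURN value: Python A mutates its argument on the
-- first deletion, B never does).

-- ===== PORT A =====
-- inner `while idx < len_arr - 1` shift loop of deletionSpecificIndexAlgo; the loop body
-- runs exactly lenArr - 1 - idx times (idx increments by 1 towards the fixed bound), so
-- that count is passed as structural fuel; returns the list together with the final idx
def pvShiftGo : Nat → List Int → Nat → List Int × Nat
  | 0, arr, idx => (arr, idx)
  | n + 1, arr, idx => pvShiftGo n (arr.set idx (arr.getD (idx + 1) 0)) (idx + 1)

def pvShift (arr : List Int) (idx : Nat) (lenArr : Nat) : List Int × Nat :=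
  pvShiftGo (lenArr - 1 - idx) arr idx

-- outer `while idx < len_arr` loop of deletionSpecificIndexAlgo; idx strictly increases
-- each iteration, so fuel lenArr + 1 (supplied below) always outlasts the loop;
-- returns (list, final idx, count)
def pvDsiaGo (val : Int) (idx_specified lenArr : Nat) :
    Nat → List Int → Nat → Nat → List Int × Nat × Nat
  | 0, arr, idx, count => (arr, idx, count)
  | fuel + 1, arr, idx, count =>
    if idx < lenArr then
      if idx = idx_specified ∧ arr.getD idx 0 = val then
        let s := pvShift arr idx lenArr
        pvDsiaGo val idx_specified lenArr fuel s.1 (s.2 + 1) (count + 1)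
      else pvDsiaGo val idx_specified lenArr fuel arr (idx + 1) count
    else (arr, idx, count)

def deletionSpecificIndexAlgo (val : Int) (idx_specified : Nat) (arr_x : List Int) : List Int :=
  let lenArr := arr_x.length
  let r := pvDsiaGo val idx_specified lenArr (lenArr + 1) arr_x 0 0
  if r.2.2 > 0 then r.1.take (r.2.1 - 1)  -- arr_x[:idx-1]; count > 0 forces idx = lenArr ≥ 1, so Nat subtraction is exact here
  else r.1

-- outer `while idx < len(arr_res_p)` loop of A's entry function; idx is always ≥ 0 in the
-- Python run (it starts at 0 and the `idx -= 1; idx += 1` pair cancels), the 0 ≤ idx test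
-- only totalises the Nat index conversion; each iteration either increments idx or
-- shortens the list, so fuel len + 1 (supplied below) always outlasts the loop
def pvMainGo (val : Int) : Nat → Int → List Int → Int → List Int
  | 0, _, arr, _ => arr
  | fuel + 1, count, arr, idx =>
    if 0 ≤ idx ∧ idx < (arr.length : Int) then
      if arr.getD idx.toNat 0 = val then
        if count ≤ 0 then
          pvMainGo val fuel (count - 1) (deletionSpecificIndexAlgo val idx.toNat arr) (idx - 1 + 1)
        else pvMainGo val fuel (count - 1) arr (idx + 1)
      else pvMainGo val fuel count arr (idx + 1)
    else arr

def deletionExceptNOccurencesAlgo (val : Int) (count : Int) (arr_res_p : List Int) : List Int :=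
  let r := pvMainGo val (arr_res_p.length + 1) count arr_res_p 0
  r.take r.length  -- arr_res_p[:len(arr_res_p)]

-- ===== PORT B =====
def deletionExceptNOccurencesAlgo_alt (val : Int) (count : Int) (arr_res_p : List Int) : List Int :=
  (arr_res_p.foldl
    (fun acc x =>
      if x = val then
        (if acc.2 + 1 ≤ count then acc.1 ++ [x] else acc.1, acc.2 + 1)
      else (acc.1 ++ [x], acc.2))
    (([] : List Int), (0 : Int))).1

-- ===== PRECONDITION & SPEC =====
def Spec_deletionExceptNOccurencesAlgo (val : Int) (count : Int) (arr_res_p : List Int) (out : List Int) : Prop := out = deletionExceptNOccurencesAlgo_alt val count arr_res_p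
instance (val : Int) (count : Int) (arr_res_p : List Int) (out : List Int) : Decidable (Spec_deletionExceptNOccurencesAlgo val count arr_res_p out) := by unfold Spec_deletionExceptNOccurencesAlgo; infer_instance

-- ===== CLAIM (what is proved, stated in full; the proofs are below) =====
def Claim_equal_deletionExceptNOccurencesAlgo : Prop := ∀ (val : Int) (count : Int) (arr_res_p : List Int), Dom_deletionExceptNOccurencesAlgo val count arr_res_p → Spec_deletionExceptNOccurencesAlgo val count arr_res_p (deletionExceptNOccurencesAlgo val count arr_res_p)

-- ===== LEMMAS AND PROOFS =====

-- reference function: keep an occurrence of val while the remaining budget c is positive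
def keepRec (val : Int) (c : Int) : List Int → List Int
  | [] => []
  | x :: xs =>
    if x = val then
      (if c ≤ 0 then keepRec val (c - 1) xs else x :: keepRec val (c - 1) xs)
    else x :: keepRec val c xs

lemma pvShiftGo_snd : ∀ (n : Nat) (arr : List Int) (idx : Nat),
    (pvShiftGo n arr idx).2 = idx + n := by
  intro n
  induction n with
  | zero => intro arr idx; rfl
  | succ n ih => intro arr idx; rw [pvShiftGo, ih]; omega

lemma pvShift_fst (lenArr : Nat) :
    ∀ n arr (idx : Nat), arr.length = lenArr → idx < lenArr → lenArr - 1 - idx = n →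
      (pvShiftGo n arr idx).1 =
        arr.take idx ++ arr.drop (idx + 1) ++ arr.drop (lenArr - 1) := by
  intro n
  induction n with
  | zero =>
    intro arr idx hlen hlt hn
    have hidx : idx = lenArr - 1 := by omega
    subst hlen
    show arr = _
    have h2 : arr.drop (idx + 1) = [] := by
      apply List.drop_eq_nil_of_le; omega
    rw [h2, hidx]
    simp
  | succ n ih =>
    intro arr idx hlen hlt hn
    rw [pvShiftGo]
    have hidx1 : idx + 1 < arr.length := by omega
    have hgd : arr.getD (idx + 1) 0 = arr[idx + 1] := List.getD_eq_getElem arr 0 hidx1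
    rw [hgd]
    have hset : arr.set idx arr[idx + 1] =
        arr.take idx ++ arr[idx + 1] :: arr.drop (idx + 1) := by
      rw [List.set_eq_take_append_cons_drop, if_pos (show idx < arr.length by omega)]
    rw [ih (arr.set idx arr[idx + 1]) (idx + 1) (by simpa using hlen) (by omega) (by omega)]
    rw [hset]
    have hlt' : (arr.take idx).length = idx := by simp; omega
    have T1 : (arr.take idx ++ arr[idx + 1] :: arr.drop (idx + 1)).take (idx + 1) =
        arr.take idx ++ [arr[idx + 1]] := by
      rw [List.take_append, hlt']
      rw [List.take_of_length_le (by rw [hlt']; omega : (arr.take idx).length ≤ idx + 1)]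
      have e2 : idx + 1 - idx = 1 := by omega
      rw [e2]
      rfl
    have T2 : (arr.take idx ++ arr[idx + 1] :: arr.drop (idx + 1)).drop (idx + 1 + 1) =
        arr.drop (idx + 1 + 1) := by
      rw [List.drop_append, hlt']
      rw [List.drop_eq_nil_of_le (by rw [hlt']; omega : (arr.take idx).length ≤ idx + 1 + 1)]
      have e3 : idx + 1 + 1 - idx = 1 + 1 := by omega
      rw [e3, List.drop_succ_cons, List.nil_append, List.drop_drop]
    have T3 : (arr.take idx ++ arr[idx + 1] :: arr.drop (idx + 1)).drop (lenArr - 1) =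
        arr.drop (lenArr - 1) := by
      rw [List.drop_append, hlt']
      rw [List.drop_eq_nil_of_le (by rw [hlt']; omega : (arr.take idx).length ≤ lenArr - 1)]
      have e4 : lenArr - 1 - idx = (lenArr - 2 - idx) + 1 := by omega
      rw [e4, List.drop_succ_cons, List.nil_append, List.drop_drop]
      congr 1
      omega
    rw [T1, T2, T3]
    rw [List.drop_eq_getElem_cons hidx1]
    simp

lemma pvDsiaGo_exit (val : Int) (ids lenArr : Nat) :
    ∀ (fuel : Nat) (arr : List Int) (idx c : Nat), ¬ idx < lenArr →
      pvDsiaGo val ids lenArr fuel arr idx c = (arr, idx, c) := by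
  intro fuel arr idx c h
  cases fuel with
  | zero => rfl
  | succ fuel => rw [pvDsiaGo, if_neg h]

lemma pvDsiaGo_spec (val : Int) (ids lenArr : Nat) :
    ∀ (fuel : Nat) (arr : List Int) (j c : Nat), arr.length = lenArr → j ≤ ids →
      ids < lenArr → arr.getD ids 0 = val → lenArr - j < fuel →
      pvDsiaGo val ids lenArr fuel arr j c = ((pvShift arr ids lenArr).1, lenArr, c + 1) := by
  intro fuel
  induction fuel with
  | zero => intro arr j c hlen hj hlt hv hb; omega
  | succ fuel ih =>
    intro arr j c hlen hj hlt hv hb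
    rw [pvDsiaGo]
    have hjl : j < lenArr := by omega
    rw [if_pos hjl]
    by_cases hje : j = ids
    · subst hje
      rw [if_pos ⟨rfl, hv⟩]
      show pvDsiaGo val j lenArr fuel (pvShift arr j lenArr).1 ((pvShift arr j lenArr).2 + 1)
        (c + 1) = _
      have hs2 : (pvShift arr j lenArr).2 = lenArr - 1 := by
        rw [pvShift, pvShiftGo_snd]; omega
      rw [hs2]
      have h1 : lenArr - 1 + 1 = lenArr := by omega
      rw [h1, pvDsiaGo_exit val j lenArr fuel _ lenArr (c + 1) (lt_irrefl _)]
    · rw [if_neg (by simp [hje])]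
      exact ih arr (j + 1) c hlen (by omega) hlt hv (by omega)

lemma dsia_spec (val : Int) (ids : Nat) (arr : List Int)
    (h : ids < arr.length) (hv : arr.getD ids 0 = val) :
    deletionSpecificIndexAlgo val ids arr = arr.take ids ++ arr.drop (ids + 1) := by
  simp only [deletionSpecificIndexAlgo]
  rw [pvDsiaGo_spec val ids arr.length (arr.length + 1) arr 0 0 rfl (Nat.zero_le _) h hv
    (by omega)]
  simp only [gt_iff_lt, Nat.zero_lt_succ, if_pos]
  rw [pvShift, pvShift_fst arr.length (arr.length - 1 - ids) arr ids rfl h rfl]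
  have hlen1 : (arr.take ids ++ arr.drop (ids + 1)).length = arr.length - 1 := by
    simp; omega
  rw [List.append_assoc, ← List.append_assoc]
  rw [List.take_append, hlen1]
  rw [List.take_of_length_le (by rw [hlen1] : (arr.take ids ++ arr.drop (ids + 1)).length ≤ arr.length - 1)]
  have e5 : arr.length - 1 - (arr.length - 1) = 0 := by omega
  rw [e5]
  simp

lemma dsia_len (val : Int) (ids : Nat) (arr : List Int)
    (h : ids < arr.length) (hv : arr.getD ids 0 = val) :
    (deletionSpecificIndexAlgo val ids arr).length = arr.length - 1 := by
  rw [dsia_spec val ids arr h hv]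
  simp; omega

lemma pvMainLoop_eq (val : Int) : ∀ (fuel : Nat) (count : Int) (arr : List Int) (idx : Int),
    0 ≤ idx → (arr.length : Int) - idx < fuel →
    pvMainGo val fuel count arr idx =
      arr.take idx.toNat ++ keepRec val count (arr.drop idx.toNat) := by
  intro fuel
  induction fuel with
  | zero =>
    intro count arr idx h0 hb
    have h1 : arr.length ≤ idx.toNat := by omega
    show arr = _
    rw [List.drop_eq_nil_of_le h1, List.take_of_length_le h1, keepRec]
    simp
  | succ fuel ih =>
    intro count arr idx h0 hb
    rw [pvMainGo]
    by_cases hlt0 : idx < (arr.length : Int)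
    case neg =>
      rw [if_neg (fun hh => hlt0 hh.2)]
      have h1 : arr.length ≤ idx.toNat := by omega
      rw [List.drop_eq_nil_of_le h1, List.take_of_length_le h1, keepRec]
      simp
    case pos =>
    rw [if_pos ⟨h0, hlt0⟩]
    have hlt : idx.toNat < arr.length := by omega
    have e3 : arr.drop idx.toNat = arr[idx.toNat] :: arr.drop (idx.toNat + 1) :=
      List.drop_eq_getElem_cons hlt
    by_cases hv : arr.getD idx.toNat 0 = val
    · have hgv : arr[idx.toNat] = val := by
        rw [← List.getD_eq_getElem arr 0 hlt]; exact hv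
      rw [if_pos hv]
      by_cases hc : count ≤ 0
      · -- delete branch: arr[idx] = val, count ≤ 0
        rw [if_pos hc]
        have hdl := dsia_len val idx.toNat arr hlt hv
        rw [ih (count - 1) (deletionSpecificIndexAlgo val idx.toNat arr) (idx - 1 + 1)
          (by omega) (by omega)]
        have hi1 : idx - 1 + 1 = idx := by omega
        rw [hi1]
        rw [dsia_spec val idx.toNat arr hlt hv]
        have hlen : (arr.take idx.toNat).length = idx.toNat := by simp; omega
        have e1 : (arr.take idx.toNat ++ arr.drop (idx.toNat + 1)).take idx.toNat
            = arr.take idx.toNat := by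
          rw [List.take_append]
          rw [List.take_take]
          have : min idx.toNat idx.toNat = idx.toNat := by omega
          rw [this, hlen]
          simp
        have e2 : (arr.take idx.toNat ++ arr.drop (idx.toNat + 1)).drop idx.toNat
            = arr.drop (idx.toNat + 1) := by
          rw [List.drop_append, hlen]
          rw [List.drop_eq_nil_of_le (by rw [hlen] : (arr.take idx.toNat).length ≤ idx.toNat)]
          simp
        rw [e1, e2]
        rw [e3, keepRec, if_pos hgv, if_pos hc]
      · -- keep branch: arr[idx] = val, count > 0
        rw [if_neg hc]
        rw [ih (count - 1) arr (idx + 1) (by omega) (by omega)]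
        have ht : (idx + 1).toNat = idx.toNat + 1 := by omega
        rw [ht]
        rw [e3, keepRec, if_pos hgv, if_neg hc]
        have e4 : arr.take (idx.toNat + 1) = arr.take idx.toNat ++ [arr[idx.toNat]] := by
          rw [List.take_add_one]
          simp [List.getElem?_eq_getElem hlt]
        rw [e4, hgv]
        simp
    · -- skip branch: arr[idx] ≠ val
      have hgv : ¬ arr[idx.toNat] = val := by
        rw [← List.getD_eq_getElem arr 0 hlt]; exact hv
      rw [if_neg hv]
      rw [ih count arr (idx + 1) (by omega) (by omega)]
      have ht : (idx + 1).toNat = idx.toNat + 1 := by omega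
      rw [ht]
      rw [e3]
      simp only [keepRec]
      rw [if_neg hgv]
      have e4 : arr.take (idx.toNat + 1) = arr.take idx.toNat ++ [arr[idx.toNat]] := by
        rw [List.take_add_one]
        simp [List.getElem?_eq_getElem hlt]
      rw [e4, List.append_assoc, List.singleton_append]

lemma foldl_keep (val cnt : Int) : ∀ (xs : List Int) (acc : List Int) (seen : Int),
    (xs.foldl
      (fun acc x =>
        if x = val then
          (if acc.2 + 1 ≤ cnt then acc.1 ++ [x] else acc.1, acc.2 + 1)
        else (acc.1 ++ [x], acc.2))
      (acc, seen)).1 = acc ++ keepRec val (cnt - seen) xs := by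
  intro xs
  induction xs with
  | nil => intro acc seen; simp [keepRec]
  | cons x xs ih =>
    intro acc seen
    by_cases hx : x = val
    · simp only [List.foldl_cons, if_pos hx]
      rw [ih]
      rw [hx, keepRec]
      by_cases hc : seen + 1 ≤ cnt
      · have hc' : ¬ (cnt - seen ≤ 0) := by omega
        rw [if_pos hc, if_pos rfl, if_neg hc']
        have : cnt - (seen + 1) = cnt - seen - 1 := by ring
        rw [this]
        simp
      · have hc' : cnt - seen ≤ 0 := by omega
        rw [if_neg hc, if_pos rfl, if_pos hc']
        have : cnt - (seen + 1) = cnt - seen - 1 := by ring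
        rw [this]
    · simp only [List.foldl_cons, if_neg hx]
      rw [ih]
      rw [keepRec, if_neg hx]
      simp

-- ===== VERDICT (by name: the statement is the Claim_ definition above) =====
theorem deletionExceptNOccurencesAlgo_spec : Claim_equal_deletionExceptNOccurencesAlgo := by
  unfold Claim_equal_deletionExceptNOccurencesAlgo
  intro val count arr _
  unfold Spec_deletionExceptNOccurencesAlgo
  unfold deletionExceptNOccurencesAlgo deletionExceptNOccurencesAlgo_alt
  simp only [List.take_length]
  rw [pvMainLoop_eq val (arr.length + 1) count arr 0 (by omega) (by omega)]
  rw [foldl_keep val count arr [] 0]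
  simp
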